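-- pv_equiv track=rewrite | github.com/syntaxticsugr/ViPER4Android-Presets | pipe/release.py | select_whitelist_xml
-- ===== SOURCE A (Python) =====
-- def select_whitelist_xml(xml_list: list[str], whitelist: list[str]) -> str:
--     """
--     Select XML name from the list based on whitelist criteria.
--     Returns the first matching name after sorting, or the first name in original list if no matches.
--     """
--     # Find all names containing whitelist words
--     matching_names = [
--         name for name in xml_list
--         if any(word.lower() in name.lower() for word in whitelist)
--     ]
--
--     # If we found matches, sort them and return the first one
--     if matching_names:
--         return sorted(matching_names)[0]
--
--     # If no matches, return the first name from original list
--     return xml_list[0]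
-- ===== SOURCE B (Python) =====
-- def select_whitelist_xml(xml_list: list[str], whitelist: list[str]) -> str:
--     """One-pass fused filter+min: track the smallest matching name; no list, no sort."""
--     lowered = [w.lower() for w in whitelist]
--     best = None
--     for name in xml_list:
--         low = name.lower()
--         if any(w in low for w in lowered):
--             if best is None or name < best:
--                 best = name
--     return best if best is not None else xml_list[0]
-- ===== Notes on version B (the rewrite author's own statement) =====
-- stated objective: faster
-- what changed: Fuses the filter and the sort into a single scan keeping one running minimum (whitelist lowercased once up front), removing the intermediate matching list and the O(m log m) sort.
-- outside the precondition, e.g. on select_whitelist_xml([], ['a']): A raises IndexError, B raises IndexError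
import Mathlib
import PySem

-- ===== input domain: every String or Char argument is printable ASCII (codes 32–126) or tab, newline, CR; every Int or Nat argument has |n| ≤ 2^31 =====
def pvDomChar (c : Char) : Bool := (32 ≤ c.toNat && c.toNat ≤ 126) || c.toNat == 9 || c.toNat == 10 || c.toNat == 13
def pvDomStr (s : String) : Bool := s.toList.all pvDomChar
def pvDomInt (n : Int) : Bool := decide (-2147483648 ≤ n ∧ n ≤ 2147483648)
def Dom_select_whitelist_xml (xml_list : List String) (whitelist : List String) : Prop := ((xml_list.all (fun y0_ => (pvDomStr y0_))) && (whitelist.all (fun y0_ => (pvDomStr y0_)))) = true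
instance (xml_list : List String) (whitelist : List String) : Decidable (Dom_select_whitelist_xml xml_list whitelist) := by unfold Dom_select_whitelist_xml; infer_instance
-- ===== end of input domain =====

-- B fuses A's filter + sort-then-head into one scan keeping a running minimum (whitelist lowercased once); objective: faster (no intermediate list, no sort).


-- ===== PORT A =====
def select_whitelist_xml (xml_list : List String) (whitelist : List String) : String :=
  let matching := xml_list.filter
    (fun name => whitelist.any (fun word => PySem.Str.isIn (PySem.Str.lower word) (PySem.Str.lower name)))
  if matching ≠ [] then
    ((PySem.List.sorted matching (fun x => x) false).headD "")
  else
    (PySem.List.pyGet? xml_list 0).getD ""   -- none = IndexError, excluded by Pre_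

-- ===== PORT B =====
def select_whitelist_xml_alt (xml_list : List String) (whitelist : List String) : String :=
  let lowered := whitelist.map PySem.Str.lower
  let best := xml_list.foldl
    (fun best name =>
      if lowered.any (fun w => PySem.Str.isIn w (PySem.Str.lower name)) then
        match best with
        | none => some name
        | some b => if name < b then some name else best
      else best)
    none
  match best with
  | some b => b
  | none => (PySem.List.pyGet? xml_list 0).getD ""   -- none = IndexError, excluded by Pre_

-- ===== PRECONDITION & SPEC =====
-- Pre_ excludes exactly the empty xml_list, on which Python A raises IndexError (xml_list[0]).
def Pre_select_whitelist_xml (xml_list : List String) (whitelist : List String) : Prop := xml_list ≠ []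
instance (xml_list : List String) (whitelist : List String) : Decidable (Pre_select_whitelist_xml xml_list whitelist) := by unfold Pre_select_whitelist_xml; infer_instance
def pvWitness_select_whitelist_xml : List String × List String := (["a.xml"], ["a"])

def Spec_select_whitelist_xml (xml_list : List String) (whitelist : List String) (out : String) : Prop := out = select_whitelist_xml_alt xml_list whitelist
instance (xml_list : List String) (whitelist : List String) (out : String) : Decidable (Spec_select_whitelist_xml xml_list whitelist out) := by unfold Spec_select_whitelist_xml; infer_instance

-- ===== CLAIM (what is proved, stated in full; the proofs are below) =====
def Claim_equal_select_whitelist_xml : Prop := ∀ (xml_list : List String) (whitelist : List String), Dom_select_whitelist_xml xml_list whitelist → Pre_select_whitelist_xml xml_list whitelist → Spec_select_whitelist_xml xml_list whitelist (select_whitelist_xml xml_list whitelist)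

-- ===== LEMMAS AND PROOFS =====

-- B's per-element step, once the match test is factored out.
def pvMinStep (best : Option String) (name : String) : Option String :=
  match best with
  | none => some name
  | some b => if name < b then some name else best

-- Folding pvMinStep from (some b) computes the running minimum value.
theorem pvFoldl_minStep (l : List String) (b : String) :
    l.foldl pvMinStep (some b) = some (l.foldl min b) := by
  induction l generalizing b with
  | nil => rfl
  | cons x xs ih =>
      simp only [List.foldl_cons]
      by_cases h : x < b
      · have h1 : pvMinStep (some b) x = some x := by simp [pvMinStep, h]
        have h2 : min b x = x := min_eq_right h.le
        rw [h1, h2, ih]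
      · have h1 : pvMinStep (some b) x = some b := by simp [pvMinStep, h]
        have h2 : min b x = b := min_eq_left (not_lt.mp h)
        rw [h1, h2, ih]

-- The head of Python's sorted list is the foldl-min of the list.
theorem pvSorted_head (c : String) (rest : List String) :
    (PySem.List.sorted (c :: rest) (fun x => x) false).headD "" = rest.foldl min c := by
  rcases hs : PySem.List.sorted (c :: rest) (fun x => x) false with _ | ⟨h, t⟩
  · exact absurd ((PySem.List.sorted_eq_nil_iff _ _ _).mp hs) (by simp)
  · have hle : ∀ y ∈ c :: rest, h ≤ y := PySem.List.key_head_sorted_le _ _ hs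
    have hmem : h ∈ c :: rest := (PySem.List.mem_sorted _ _ _ _).mp (by rw [hs]; exact List.mem_cons_self)
    have hm2 : (c :: rest).min? = some (rest.foldl min c) := by simp [List.min?]
    obtain ⟨hmemm, hlem⟩ := List.min?_eq_some_iff.mp hm2
    simp only [List.headD_cons]
    exact le_antisymm (hle _ hmemm) (hlem _ hmem)

-- ===== VERDICT (by name: the statement is the Claim_ definition above) =====

theorem select_whitelist_xml_spec : Claim_equal_select_whitelist_xml := by
  intro xml_list whitelist _ _
  unfold Spec_select_whitelist_xml
  simp only [select_whitelist_xml, select_whitelist_xml_alt]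
  have hstep : (fun (best : Option String) (name : String) =>
      if (whitelist.map PySem.Str.lower).any (fun w => PySem.Str.isIn w (PySem.Str.lower name)) = true then
        match best with
        | none => some name
        | some b => if name < b then some name else best
      else best)
    = fun best name =>
        if (whitelist.any fun word => PySem.Str.isIn (PySem.Str.lower word) (PySem.Str.lower name)) = true then
          pvMinStep best name
        else best := by
    funext best name
    simp [List.any_map, pvMinStep, Function.comp]
  rw [hstep, ← List.foldl_filter]
  rcases hm : xml_list.filter
      (fun name => whitelist.any fun word => PySem.Str.isIn (PySem.Str.lower word) (PySem.Str.lower name))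
    with _ | ⟨c, rest⟩
  · simp
  · rw [List.foldl_cons]
    have h0 : pvMinStep none c = some c := rfl
    rw [h0, pvFoldl_minStep]
    simp only [ne_eq, reduceCtorEq, not_false_eq_true, if_true]
    exact pvSorted_head c rest
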